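-- pv_equiv track=rewrite | github.com/tynegr/omd | solution_1.py | max_even_sum
-- ===== SOURCE A (Python) =====
-- def max_even_sum(numbers: list) -> int:
--     ans = 0
--     odd_min = float('inf')
--     odd_sum = 0
--
--     for num in numbers:
--         if num % 2 == 0:
--             ans += num
--         else:
--             odd_sum += num
--             odd_min = min(num, odd_min)
--
--     if odd_sum % 2 != 0:
--         ans -= odd_min
--
--     return ans + odd_sum
-- ===== SOURCE B (Python) =====
-- def max_even_sum(numbers: list) -> int:
--     srt = sorted(numbers)
--     total = sum(srt)
--     if total % 2 == 0:
--         return total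
--     return total - next(x for x in srt if x % 2)
-- ===== Notes on version B (the rewrite author's own statement) =====
-- stated objective: alternative
-- what changed: B sorts the list, tests the parity of the grand total, and when it is odd finds the smallest odd element as the FIRST odd in ascending order by linear search over the sorted list, instead of A's single pass maintaining separate even-sum, odd-sum and running odd-minimum accumulators.
import Mathlib
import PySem

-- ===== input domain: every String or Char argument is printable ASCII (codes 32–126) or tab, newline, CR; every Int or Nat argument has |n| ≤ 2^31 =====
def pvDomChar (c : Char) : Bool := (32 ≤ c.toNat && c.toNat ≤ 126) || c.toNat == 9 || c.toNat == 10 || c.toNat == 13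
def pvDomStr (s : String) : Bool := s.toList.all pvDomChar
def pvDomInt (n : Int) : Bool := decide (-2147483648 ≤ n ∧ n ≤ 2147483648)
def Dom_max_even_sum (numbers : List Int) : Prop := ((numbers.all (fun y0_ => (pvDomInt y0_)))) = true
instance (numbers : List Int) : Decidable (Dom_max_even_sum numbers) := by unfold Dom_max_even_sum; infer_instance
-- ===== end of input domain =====

-- B replaces A's single bookkeeping pass (even-sum / odd-sum / odd-min accumulators) by
-- sort-then-search: sort, test the parity of the grand total, and when odd subtract the first
-- odd element in ascending order; same results, a different algorithm (alternative).

-- ===== PORT A =====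
-- A's odd_min starts at float('inf'); ported as Option Int (none = inf), exact since the
-- subtraction branch is only reached when at least one odd number updated odd_min.
def maxesStep (st : Int × Option Int × Int) (num : Int) : Int × Option Int × Int :=
  if PySem.Int.mod num 2 == 0 then (st.1 + num, st.2.1, st.2.2)
  else (st.1, (match st.2.1 with
               | none => some num
               | some m => some (min num m)), st.2.2 + num)

def max_even_sum (numbers : List Int) : Int :=
  let st := numbers.foldl maxesStep (0, none, 0)
  let ans := if PySem.Int.mod st.2.2 2 ≠ 0 then st.1 - st.2.1.getD 0 else st.1
  ans + st.2.2

-- ===== PORT B =====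
-- Source B: srt = sorted(numbers); total = sum(srt); if total % 2 == 0: return total;
--       return total - next(x for x in srt if x % 2).
-- `next` is ported as find?; the `.getD 0` default is unreachable: the branch runs only
-- when total is odd, which forces an odd element to exist.
def max_even_sum_alt (numbers : List Int) : Int :=
  let srt := PySem.List.sorted numbers (fun x => x) false
  let total := srt.sum
  if PySem.Int.mod total 2 == 0 then total
  else total - (srt.find? (fun x => decide (PySem.Int.mod x 2 ≠ 0))).getD 0

-- ===== PRECONDITION & SPEC =====
def Spec_max_even_sum (numbers : List Int) (out : Int) : Prop := out = max_even_sum_alt numbers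
instance (numbers : List Int) (out : Int) : Decidable (Spec_max_even_sum numbers out) := by unfold Spec_max_even_sum; infer_instance

-- ===== CLAIM (what is proved, stated in full; the proofs are below) =====
def Claim_equal_max_even_sum : Prop := ∀ (numbers : List Int), Dom_max_even_sum numbers → Spec_max_even_sum numbers (max_even_sum numbers)

-- ===== LEMMAS AND PROOFS =====

def pvMinStep (acc : Option Int) (n : Int) : Option Int :=
  match acc with
  | none => some n
  | some m => some (min n m)

theorem pv_fold_char (xs : List Int) : ∀ (ans : Int) (om : Option Int) (os : Int),
    xs.foldl maxesStep (ans, om, os) =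
      (ans + (xs.filter (fun x => PySem.Int.mod x 2 == 0)).sum,
       (xs.filter (fun x => !(PySem.Int.mod x 2 == 0))).foldl pvMinStep om,
       os + (xs.filter (fun x => !(PySem.Int.mod x 2 == 0))).sum) := by
  induction xs with
  | nil => simp
  | cons x t ih =>
    intro ans om os
    simp only [List.foldl_cons, maxesStep, List.filter_cons]
    by_cases h : (PySem.Int.mod x 2 == 0) = true
    · rw [if_pos h, ih]
      simp only [h, Bool.not_true, if_pos, if_neg, Bool.false_eq_true, not_false_iff,
        List.sum_cons, if_true, if_false]
      refine Prod.ext ?_ (Prod.ext rfl ?_) <;> simp <;> ring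
    · rw [if_neg h, ih]
      simp only [h, Bool.not_false, List.filter_cons, if_true, if_false, List.sum_cons,
        List.foldl_cons, pvMinStep, Bool.false_eq_true, not_false_iff]
      refine Prod.ext rfl (Prod.ext ?_ ?_)
      · cases om <;> rfl
      · simp; ring

theorem pv_minfold (t : List Int) : ∀ (a : Int),
    t.foldl pvMinStep (some a) = some (t.foldl min a) := by
  induction t with
  | nil => intro a; rfl
  | cons x s ih => intro a; simp [pvMinStep, ih, min_comm]

theorem pv_sum_split (xs : List Int) :
    xs.sum = (xs.filter (fun x => PySem.Int.mod x 2 == 0)).sum +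
             (xs.filter (fun x => !(PySem.Int.mod x 2 == 0))).sum := by
  induction xs with
  | nil => simp
  | cons x t ih =>
    by_cases h : (PySem.Int.mod x 2 == 0) = true <;>
      simp only [List.filter_cons, h, List.sum_cons, ih, if_true, if_false,
        Bool.not_true, Bool.not_false, Bool.false_eq_true, not_false_iff] <;> ring

theorem pv_decide_ne (m : Int) : decide (m ≠ 0) = !(m == 0) := by
  by_cases h : m = 0 <;> simp [h]

theorem pv_pred_eq :
    (fun x => decide (PySem.Int.mod x 2 ≠ 0)) = (fun x => !(PySem.Int.mod x 2 == 0)) := by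
  funext x
  exact pv_decide_ne (PySem.Int.mod x 2)

-- the even part of the sum is divisible by 2
theorem pv_evens_dvd (xs : List Int) :
    (2 : Int) ∣ (xs.filter (fun x => PySem.Int.mod x 2 == 0)).sum := by
  apply List.dvd_sum
  intro y hy
  have := List.of_mem_filter hy
  simpa [PySem.Int.mod_eq_zero_iff_dvd] using this

theorem pv_parity (E O : Int) (hE : (2 : Int) ∣ E) :
    (PySem.Int.mod (E + O) 2 = 0) ↔ (PySem.Int.mod O 2 = 0) := by
  rw [PySem.Int.mod_eq_zero_iff_dvd, PySem.Int.mod_eq_zero_iff_dvd]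
  constructor
  · intro h; have := dvd_sub h hE; simpa using this
  · intro h; exact dvd_add hE h

-- the foldl-min of a::t is the minimum of a::t
theorem pv_foldl_min_spec (t : List Int) (a : Int) :
    t.foldl min a ∈ a :: t ∧ ∀ b ∈ a :: t, t.foldl min a ≤ b := by
  have h : (a :: t).min? = some (t.foldl min a) := rfl
  exact List.min?_eq_some_iff.mp h

-- ===== VERDICT (by name: the statement is the Claim_ definition above) =====
theorem max_even_sum_spec : Claim_equal_max_even_sum := by
  intro numbers _
  simp only [Spec_max_even_sum, max_even_sum, max_even_sum_alt]
  rw [pv_pred_eq, pv_fold_char]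
  dsimp only
  simp only [zero_add]
  set p : Int → Bool := fun x => !(PySem.Int.mod x 2 == 0) with hp
  set odds := numbers.filter p with hodds
  set srt := PySem.List.sorted numbers (fun x => x) false with hsrt
  have hperm : srt.Perm numbers := PySem.List.sorted_perm numbers (fun x => x) false
  have hsum : srt.sum = (numbers.filter (fun x => PySem.Int.mod x 2 == 0)).sum + odds.sum := by
    rw [hperm.sum_eq, pv_sum_split]
  have hpar := pv_parity (numbers.filter (fun x => PySem.Int.mod x 2 == 0)).sum odds.sum
    (pv_evens_dvd numbers)
  by_cases hO : PySem.Int.mod odds.sum 2 = 0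
  · have : PySem.Int.mod srt.sum 2 = 0 := by rw [hsum]; exact hpar.mpr hO
    rw [if_neg (show ¬ PySem.Int.mod odds.sum 2 ≠ 0 from fun h => h hO),
      if_pos (show (PySem.Int.mod srt.sum 2 == 0) = true by simpa only [beq_iff_eq] using this), hsum]
  · have hne : odds ≠ [] := by
      intro h; rw [h] at hO; exact hO (by decide)
    obtain ⟨a, t, ht⟩ := List.exists_cons_of_ne_nil hne
    have htot : ¬ PySem.Int.mod srt.sum 2 = 0 := by rw [hsum]; exact fun h => hO (hpar.mp h)
    rw [if_pos hO, if_neg (show ¬ (PySem.Int.mod srt.sum 2 == 0) = true by simpa only [beq_iff_eq] using htot)]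
    -- A subtracts the foldl-min of odds; identify it with B's first odd in sorted order
    rw [ht, show List.foldl pvMinStep none (a :: t) = List.foldl pvMinStep (some a) t from rfl,
      pv_minfold]
    simp only [Option.getD_some]
    -- B's find? is the head of the sorted odds
    rw [← List.head?_filter]
    have hpermf : (srt.filter p).Perm odds := hperm.filter p
    have hnef : srt.filter p ≠ [] := by
      intro h
      exact hne (List.Perm.eq_nil (h ▸ hpermf).symm)
    obtain ⟨f, tf, htf⟩ := List.exists_cons_of_ne_nil hnef
    rw [htf]
    simp only [List.head?_cons, Option.getD_some]
    -- f = foldl min a t by antisymmetry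
    have hsorted : srt.Pairwise (fun x y => x ≤ y) := by
      have := PySem.List.sorted_pairwise numbers (fun x => x) (κ := Int)
      simpa [hsrt] using this
    have hfle : ∀ b ∈ odds, f ≤ b := by
      intro b hb
      have hbmem : b ∈ f :: tf := htf ▸ hpermf.symm.subset hb
      rcases List.mem_cons.mp hbmem with rfl | hbt
      · exact le_refl _
      · have : (f :: tf).Pairwise (fun x y => x ≤ y) := htf ▸ hsorted.filter p
        exact (List.pairwise_cons.mp this).1 b hbt
    have hfmem : f ∈ odds := hpermf.subset (htf ▸ List.mem_cons_self)
    have hmin := pv_foldl_min_spec t a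
    have h1 : f ≤ t.foldl min a := hfle _ (ht ▸ hmin.1)
    have h2 : t.foldl min a ≤ f := hmin.2 f (ht ▸ hfmem)
    rw [hsum, le_antisymm h1 h2, ← ht]
    ring
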